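-- pv_equiv track=rewrite | github.com/confusedonut22/submittal | exact_sidebet_math.py | _weight_for
-- ===== SOURCE A (Python) =====
-- from math import comb
-- from typing import Dict, Iterable, Tuple
--
-- DECKS = 6
--
-- def _weight_for(index_combo: Iterable[int]) -> int:
--     counts: Dict[int, int] = {}
--     for index in index_combo:
--         counts[index] = counts.get(index, 0) + 1
--     weight = 1
--     for copies in counts.values():
--         weight *= comb(DECKS, copies)
--     return weight
-- ===== SOURCE B (Python) =====
-- from math import comb
--
-- DECKS = 6
--
-- def _weight_for(index_combo):
--     xs = sorted(index_combo)
--     weight = 1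
--     i, n = 0, len(xs)
--     while i < n:
--         j = i
--         while j < n and xs[j] == xs[i]:
--             j += 1
--         weight *= comb(DECKS, j - i)
--         i = j
--     return weight
-- ===== Notes on version B (the rewrite author's own statement) =====
-- stated objective: alternative
-- what changed: Replaces the dict-based occurrence counting (build a counts dict, then multiply comb(6, c) over its values) with sort-then-scan: the input is sorted and a single pointer walk over the sorted list measures each run of equal indices and multiplies comb(6, run length) in.
import Mathlib
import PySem

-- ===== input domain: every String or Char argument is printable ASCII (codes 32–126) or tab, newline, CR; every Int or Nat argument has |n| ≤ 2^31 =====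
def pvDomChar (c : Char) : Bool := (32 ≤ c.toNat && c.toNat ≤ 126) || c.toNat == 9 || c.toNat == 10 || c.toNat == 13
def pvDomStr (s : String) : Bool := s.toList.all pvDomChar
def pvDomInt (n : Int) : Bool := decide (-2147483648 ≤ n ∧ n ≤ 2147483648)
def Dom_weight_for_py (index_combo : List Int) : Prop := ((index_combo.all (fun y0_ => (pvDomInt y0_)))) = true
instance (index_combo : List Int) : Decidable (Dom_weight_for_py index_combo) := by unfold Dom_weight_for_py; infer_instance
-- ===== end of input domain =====

-- B replaces A's dict-based occurrence counting with sort-then-scan over runs of equal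
-- indices (alternative decomposition, same results; not claimed faster).


-- ===== PORT A =====
-- math.comb(6, c) for a nonnegative int count c (both Pythons call it only with c ≥ 1)
def pyComb6 (c : Int) : Int := ((Nat.choose 6 c.toNat : Nat) : Int)

def weight_for_py (index_combo : List Int) : Int :=
  -- counts = {}; for index in index_combo: counts[index] = counts.get(index, 0) + 1
  let counts : PySem.Dict Int Int :=
    index_combo.foldl (fun d i => d.insert i (d.getD i 0 + 1)) PySem.Dict.empty
  -- weight = 1; for copies in counts.values(): weight *= comb(DECKS, copies)
  counts.values.foldl (fun w copies => w * pyComb6 copies) 1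

-- ===== PORT B =====
-- the inner 'while j < n and xs[j] == xs[i]' run scan over the sorted list, then advance i to j
def pvRunScan : List Int → Int
  | [] => 1
  | x :: ys =>
      pyComb6 (((ys.takeWhile (· == x)).length + 1 : Nat) : Int) *
        pvRunScan (ys.dropWhile (· == x))
termination_by l => l.length
decreasing_by
  have := List.length_dropWhile_le (· == x) ys
  simp; omega

def weight_for_py_alt (index_combo : List Int) : Int :=
  pvRunScan (PySem.List.sorted index_combo (fun v => v) false)

-- ===== PRECONDITION & SPEC =====
def Spec_weight_for_py (index_combo : List Int) (out : Int) : Prop := out = weight_for_py_alt index_combo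
instance (index_combo : List Int) (out : Int) : Decidable (Spec_weight_for_py index_combo out) := by unfold Spec_weight_for_py; infer_instance

-- ===== CLAIM (what is proved, stated in full; the proofs are below) =====
def Claim_equal_weight_for_py : Prop := ∀ (index_combo : List Int), Dom_weight_for_py index_combo → Spec_weight_for_py index_combo (weight_for_py index_combo)

-- ===== LEMMAS AND PROOFS =====

-- multiply-accumulate fold is a product of a map
theorem pv_foldl_mul (l : List Int) (f : Int → Int) (a : Int) :
    l.foldl (fun w c => w * f c) a = a * (l.map f).prod := by
  induction l generalizing a with
  | nil => simp
  | cons x xs ih => simp [List.foldl_cons, ih, mul_assoc]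

-- A's result is the product of pyComb6 (count k) over the distinct elements of xs
theorem pv_A_char (xs : List Int) :
    weight_for_py xs =
      ((PySem.Set.ofList xs).map (fun k => pyComb6 ((xs.count k : Nat) : Int))).prod := by
  unfold weight_for_py
  show List.foldl (fun w copies => w * pyComb6 copies) 1
      (List.foldl (fun d i => d.insert i (d.getD i 0 + 1)) PySem.Dict.empty xs).values = _
  rw [PySem.Dict.foldl_insert_getD_add_one_eq_counter]
  have hv : (PySem.Dict.counter xs).values =
      (PySem.Set.ofList xs).map (fun k => ((xs.count k : Nat) : Int)) := by
    show ((PySem.Dict.counter xs).items).map (·.2) = _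
    rw [PySem.Dict.items_counter, List.map_map]; rfl
  rw [hv, pv_foldl_mul, List.map_map, one_mul]; rfl

-- B's run scan on a sorted list is the same product over its distinct elements
theorem pv_B_char (s : List Int) (hs : s.Pairwise (· ≤ ·)) :
    pvRunScan s =
      ((PySem.Set.ofList s).map (fun k => pyComb6 ((s.count k : Nat) : Int))).prod := by
  induction s using pvRunScan.induct with
  | case1 => simp [pvRunScan]
  | case2 x ys ih =>
    set t := ys.takeWhile (· == x) with ht
    set d := ys.dropWhile (· == x) with hd
    have hts : ys = t ++ d := (List.takeWhile_append_dropWhile (p := (· == x)) (l := ys)).symm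
    have htx : ∀ y ∈ t, y = x := by
      intro y hy
      have := List.mem_takeWhile_imp hy
      simpa using this
    have hys : ys.Pairwise (· ≤ ·) := hs.of_cons
    have hxle : ∀ y ∈ ys, x ≤ y := by
      intro y hy; exact (List.pairwise_cons.mp hs).1 y hy
    have hdsub : d.Sublist ys := List.dropWhile_sublist _
    have hds : d.Pairwise (· ≤ ·) := hys.sublist hdsub
    have hxd : ∀ y ∈ d, y ≠ x := by
      cases hdE : d with
      | nil => simp
      | cons h r =>
        have hhx : ¬ (h == x) = true := by
          have := List.head?_dropWhile_not (· == x) ys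
          rw [← hd, hdE] at this; simpa using this
        have hhx' : h ≠ x := by simpa using hhx
        have hxh : x < h := lt_of_le_of_ne (hxle h (hdsub.mem (hdE ▸ List.mem_cons_self))) (Ne.symm hhx')
        intro y hy
        rcases List.mem_cons.mp hy with rfl | hyr
        · exact hhx'
        · have : h ≤ y := (List.pairwise_cons.mp (hdE ▸ hds)).1 y hyr
          omega
    -- counts
    have hcx : (x :: ys).count x = t.length + 1 := by
      rw [List.count_cons_self, hts, List.count_append]
      have h1 : t.count x = t.length := List.count_eq_length.mpr (fun y hy => by simp [htx y hy])
      have h2 : d.count x = 0 := List.count_eq_zero.mpr (fun h => (hxd x h) rfl)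
      omega
    have hck : ∀ k, k ≠ x → (x :: ys).count k = d.count k := by
      intro k hk
      have hcc : (x :: ys).count k = ys.count k := by
        simp [Ne.symm hk]
      rw [hcc, hts, List.count_append]
      have : t.count k = 0 := List.count_eq_zero.mpr (fun h => hk (htx k h))
      omega
    -- distinct elements: Set.ofList (x :: ys) is a permutation of x :: Set.ofList d
    have hperm : (PySem.Set.ofList (x :: ys)).Perm (x :: PySem.Set.ofList d) := by
      rw [List.perm_ext_iff_of_nodup (PySem.Set.nodup_ofList _)
        (by
          refine List.nodup_cons.mpr ⟨?_, PySem.Set.nodup_ofList _⟩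
          intro hx; exact (hxd x ((PySem.Set.mem_ofList _ _).mp hx)) rfl)]
      intro a
      simp only [PySem.Set.mem_ofList, List.mem_cons]
      constructor
      · rintro (rfl | ha)
        · exact Or.inl rfl
        · rw [hts] at ha
          rcases List.mem_append.mp ha with h | h
          · exact Or.inl (htx a h)
          · exact Or.inr h
      · rintro (rfl | ha)
        · exact Or.inl rfl
        · exact Or.inr (hts ▸ List.mem_append.mpr (Or.inr ha))
    have hmapcong :
        (PySem.Set.ofList d).map (fun k => pyComb6 ((d.count k : Nat) : Int)) =
        (PySem.Set.ofList d).map (fun k => pyComb6 (((x :: ys).count k : Nat) : Int)) := by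
      apply List.map_congr_left
      intro k hk
      have hkx : k ≠ x := fun h => (hxd k ((PySem.Set.mem_ofList _ _).mp hk)) (h ▸ rfl)
      rw [hck k hkx]
    rw [pvRunScan]
    rw [ih hds, hmapcong]
    have := (hperm.map (fun k => pyComb6 (((x :: ys).count k : Nat) : Int))).prod_eq
    rw [this, List.map_cons, List.prod_cons, hcx]

theorem pv_equiv (xs : List Int) : weight_for_py xs = weight_for_py_alt xs := by
  unfold weight_for_py_alt
  set s := PySem.List.sorted xs (fun v => v) false with hsdef
  have hperm : s.Perm xs := PySem.List.sorted_perm xs (fun v => v) false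
  have hpw : s.Pairwise (· ≤ ·) := by
    have := PySem.List.sorted_pairwise xs (fun v => v)
    simpa using this
  rw [pv_B_char s hpw, pv_A_char]
  have hcnt : ∀ k, s.count k = xs.count k := fun k => hperm.count_eq k
  have hmc : (PySem.Set.ofList s).map (fun k => pyComb6 ((s.count k : Nat) : Int)) =
      (PySem.Set.ofList s).map (fun k => pyComb6 ((xs.count k : Nat) : Int)) := by
    apply List.map_congr_left; intro k _; rw [hcnt k]
  have hsetperm : (PySem.Set.ofList xs).Perm (PySem.Set.ofList s) := by
    rw [List.perm_ext_iff_of_nodup (PySem.Set.nodup_ofList _) (PySem.Set.nodup_ofList _)]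
    intro a
    simp only [PySem.Set.mem_ofList]
    exact ⟨fun h => hperm.mem_iff.mpr h, fun h => hperm.mem_iff.mp h⟩
  rw [hmc, (hsetperm.map (fun k => pyComb6 ((xs.count k : Nat) : Int))).prod_eq]

-- ===== VERDICT (by name: the statement is the Claim_ definition above) =====
theorem weight_for_py_spec : Claim_equal_weight_for_py := by
  intro xs _
  exact pv_equiv xs
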